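-- pv_equiv track=rewrite | github.com/Vladimir-Moskov/PythonInterview | HackerRank/Hack_Interview_VI_US.py | countCups
-- ===== SOURCE A (Python) =====
-- from bisect import bisect_left as bl, bisect_right as br
--
-- def countCups(n, balls, swaps, queries):
--     # Write your code here
--     m = set(balls)
--     for i,j in swaps:
--         if i in m and j not in m:
--             m.add(j)
--             m.remove(i)
--         elif i not in m and j in m:
--             m.remove(j)
--             m.add(i)
--     l = list(m)
--     l.sort()
--     return [br(l,j) - bl(l,i) for i,j in queries]
-- ===== SOURCE B (Python) =====
-- def countCups(n, balls, swaps, queries):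
--     m = set(balls)
--     for i, j in swaps:
--         if i in m and j not in m:
--             m.add(j)
--             m.remove(i)
--         elif i not in m and j in m:
--             m.remove(j)
--             m.add(i)
--     # answer each query by two prefix-count scans of the set (no sort, no bisect);
--     # matches A exactly, including negative results when i > j
--     return [sum(1 for x in m if x <= j) - sum(1 for x in m if x < i)
--             for i, j in queries]
-- ===== Notes on version B (the rewrite author's own statement) =====
-- stated objective: alternative
-- what changed: Queries are answered by scanning the unsorted set twice per query (count of x<=j minus count of x<i) instead of sorting the set once and binary-searching with bisect.
import Mathlib
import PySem

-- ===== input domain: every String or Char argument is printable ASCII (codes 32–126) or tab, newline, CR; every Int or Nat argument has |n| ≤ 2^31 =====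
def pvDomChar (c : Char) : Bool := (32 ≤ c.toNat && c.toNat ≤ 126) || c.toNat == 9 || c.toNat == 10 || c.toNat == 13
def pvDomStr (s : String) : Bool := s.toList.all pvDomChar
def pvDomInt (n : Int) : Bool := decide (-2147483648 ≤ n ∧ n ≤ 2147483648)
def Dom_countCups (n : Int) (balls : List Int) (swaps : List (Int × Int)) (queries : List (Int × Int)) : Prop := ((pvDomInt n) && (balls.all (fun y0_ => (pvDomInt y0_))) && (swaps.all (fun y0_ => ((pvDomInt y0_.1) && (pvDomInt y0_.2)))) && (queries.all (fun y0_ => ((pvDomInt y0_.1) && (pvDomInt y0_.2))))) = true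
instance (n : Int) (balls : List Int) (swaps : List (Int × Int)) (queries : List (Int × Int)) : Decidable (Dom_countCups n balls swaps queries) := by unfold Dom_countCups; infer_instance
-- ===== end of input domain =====

-- B answers each query by two prefix-count scans of the unsorted set instead of
-- A's sort + bisect; alternative traversal, same results (return value only, no mutation).

-- ===== PORT A =====
-- The swap-processing loop is character-for-character identical in A and B, so both
-- ports share this helper.  Python's m.remove(e) is ported as Set.discard: in both
-- branches the removed element is guaranteed present, where remove and discard agree.
def swapLoop (balls : List Int) (swaps : List (Int × Int)) : PySem.Set Int :=
  swaps.foldl (fun m ij =>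
    if PySem.Set.contains m ij.1 && !PySem.Set.contains m ij.2 then
      PySem.Set.discard (PySem.Set.add m ij.2) ij.1
    else if !PySem.Set.contains m ij.1 && PySem.Set.contains m ij.2 then
      PySem.Set.add (PySem.Set.discard m ij.2) ij.1
    else m) (PySem.Set.ofList balls)

-- l = list(m); l.sort()  — sorting a set's elements with no key: result is order-independent
def countCups (n : Int) (balls : List Int) (swaps : List (Int × Int)) (queries : List (Int × Int)) : List Int :=
  let m := swapLoop balls swaps
  let l := PySem.List.sorted m (fun x => x) false
  queries.map (fun ij => (PySem.List.bisectRight l ij.2 : Int) - (PySem.List.bisectLeft l ij.1 : Int))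

-- ===== PORT B =====
-- sum(1 for x in m if …) over a set: a 0/1 accumulation whose result is order-independent
def countCups_alt (n : Int) (balls : List Int) (swaps : List (Int × Int)) (queries : List (Int × Int)) : List Int :=
  let m := swapLoop balls swaps
  queries.map (fun ij =>
    (m.foldl (fun acc x => if x ≤ ij.2 then acc + 1 else acc) (0 : Int)) -
    (m.foldl (fun acc x => if x < ij.1 then acc + 1 else acc) (0 : Int)))

-- ===== PRECONDITION & SPEC =====
def Spec_countCups (n : Int) (balls : List Int) (swaps : List (Int × Int)) (queries : List (Int × Int)) (out : List Int) : Prop := out = countCups_alt n balls swaps queries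
instance (n : Int) (balls : List Int) (swaps : List (Int × Int)) (queries : List (Int × Int)) (out : List Int) : Decidable (Spec_countCups n balls swaps queries out) := by unfold Spec_countCups; infer_instance

-- ===== CLAIM (what is proved, stated in full; the proofs are below) =====
def Claim_equal_countCups : Prop := ∀ (n : Int) (balls : List Int) (swaps : List (Int × Int)) (queries : List (Int × Int)), Dom_countCups n balls swaps queries → Spec_countCups n balls swaps queries (countCups n balls swaps queries)

-- ===== LEMMAS AND PROOFS =====

-- a cut point k (everything before it satisfies p, nothing from it on does) equals countP p
theorem countP_eq_of_cut (l : List Int) (p : Int → Bool) (k : Nat) (hk : k ≤ l.length)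
    (h1 : ∀ j (hj : j < l.length), j < k → p l[j])
    (h2 : ∀ j (hj : j < l.length), k ≤ j → ¬ p l[j]) :
    l.countP p = k := by
  have hcut : l.countP p = (l.take k).countP p + (l.drop k).countP p := by
    rw [← List.countP_append, List.take_append_drop]
  have htake : (l.take k).countP p = k := by
    rw [List.countP_eq_length.mpr, List.length_take, Nat.min_eq_left hk]
    intro a ha
    obtain ⟨j, hj, rfl⟩ := List.mem_iff_getElem.mp ha
    have hjk : j < k := lt_of_lt_of_le hj (by simp [List.length_take])
    have hjl : j < l.length := lt_of_lt_of_le hjk hk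
    have := h1 j hjl hjk
    simpa [List.getElem_take] using this
  have hdrop : (l.drop k).countP p = 0 := by
    rw [List.countP_eq_zero]
    intro a ha
    obtain ⟨j, hj, rfl⟩ := List.mem_iff_getElem.mp ha
    have hjl : k + j < l.length := by
      have := hj
      simp only [List.length_drop] at this
      omega
    have := h2 (k + j) hjl (Nat.le_add_right _ _)
    simpa [List.getElem_drop] using this
  omega

theorem bisectLeft_eq_countP (l : List Int) (x : Int)
    (hs : List.Pairwise (fun a b => a ≤ b) l) :
    PySem.List.bisectLeft l x = l.countP (fun v => decide (v < x)) := by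
  obtain ⟨hk, h1, h2⟩ := PySem.List.bisectLeft_spec l x hs
  exact (countP_eq_of_cut l _ _ hk
    (fun j hj hjk => by simpa using h1 j hj hjk)
    (fun j hj hkj => by simpa using not_lt.mpr (h2 j hj hkj))).symm

theorem bisectRight_eq_countP (l : List Int) (x : Int)
    (hs : List.Pairwise (fun a b => a ≤ b) l) :
    PySem.List.bisectRight l x = l.countP (fun v => decide (v ≤ x)) := by
  obtain ⟨hk, h1, h2⟩ := PySem.List.bisectRight_spec l x hs
  exact (countP_eq_of_cut l _ _ hk
    (fun j hj hjk => by simpa using h1 j hj hjk)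
    (fun j hj hkj => by simpa using not_le.mpr (h2 j hj hkj))).symm

-- ===== VERDICT (by name: the statement is the Claim_ definition above) =====
theorem countCups_spec : Claim_equal_countCups := by
  intro n balls swaps queries _
  unfold Spec_countCups countCups countCups_alt
  apply List.map_congr_left
  intro ij _
  set m := swapLoop balls swaps with hm
  set l := PySem.List.sorted m (fun x => x) false with hl
  have hs : List.Pairwise (fun a b => a ≤ b) l := by
    simpa using PySem.List.sorted_pairwise m (fun x => x)
  have hperm : l.Perm m := PySem.List.sorted_perm m (fun x => x) false
  rw [bisectLeft_eq_countP l ij.1 hs, bisectRight_eq_countP l ij.2 hs,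
    hperm.countP_eq, hperm.countP_eq,
    PySem.List.foldl_ite_add_one (fun x => x ≤ ij.2) m 0,
    PySem.List.foldl_ite_add_one (fun x => x < ij.1) m 0]
  simp
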